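-- pv_equiv track=rewrite | github.com/shhossain/computer_science | Number System/Conversion_In_Python2.py | octal_to_binary
-- ===== SOURCE A (Python) =====
-- def octal_to_binary(octal):
--     try:
--         if octal.startswith("0o"):
--             octal = octal[2:]  # Remove '0o' prefix
--         binary = ""
--         for digit in octal:
--             if not '0' <= digit <= '7':
--                 raise ValueError("Invalid octal digit: {}".format(digit))
--             binary += format(int(digit, 8), '03b')  # Convert to 3-bit binary with leading zeros
--         return "0b" + binary
--     except ValueError:
--         return None
-- ===== SOURCE B (Python) =====
-- def octal_to_binary(octal):
--     if octal.startswith("0o"):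
--         octal = octal[2:]
--     value = 0
--     for c in octal:
--         if not '0' <= c <= '7':
--             return None
--         value = value * 8 + (ord(c) - 48)
--     n = 3 * len(octal)
--     bits = [''] * n
--     for i in range(n - 1, -1, -1):
--         bits[i] = chr(48 + (value & 1))
--         value >>= 1
--     return "0b" + "".join(bits)
-- ===== Notes on version B (the rewrite author's own statement) =====
-- stated objective: alternative
-- what changed: Instead of mapping each octal digit to a 3-char binary string and concatenating, B converts the whole string to one integer by Horner accumulation and then extracts its 3*len(octal) low bits back-to-front by shifts.
import Mathlib
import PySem

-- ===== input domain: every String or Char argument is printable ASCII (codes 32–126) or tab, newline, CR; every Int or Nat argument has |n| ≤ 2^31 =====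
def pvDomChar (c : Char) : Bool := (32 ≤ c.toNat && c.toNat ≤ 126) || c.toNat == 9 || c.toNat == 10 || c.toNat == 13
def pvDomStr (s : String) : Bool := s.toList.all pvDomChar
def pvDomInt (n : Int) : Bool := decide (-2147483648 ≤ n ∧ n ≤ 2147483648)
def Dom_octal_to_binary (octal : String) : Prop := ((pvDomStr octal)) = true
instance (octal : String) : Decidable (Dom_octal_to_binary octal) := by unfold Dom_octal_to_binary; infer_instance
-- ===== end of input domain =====

-- B converts via a single integer (Horner accumulation, then back-to-front bit
-- extraction) instead of A's per-digit 3-bit string concatenation (alternative algorithm).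


-- ===== PORT A =====
-- format(int(digit, 8), '03b'): the digit's value written as exactly 3 binary chars
def pvBit (b : Nat) : Char := if b = 0 then '0' else '1'
def pvFmt3 (n : Nat) : List Char := [pvBit (n / 4 % 2), pvBit (n / 2 % 2), pvBit (n % 2)]

-- A's for-loop: accumulate 3-bit groups; 'raise ValueError' = none (caught, → None)
def pvALoop : List Char → List Char → Option (List Char)
  | [], acc => some acc
  | c :: rest, acc =>
      if '0' ≤ c ∧ c ≤ '7' then pvALoop rest (acc ++ pvFmt3 (c.toNat - 48))
      else none

def octal_to_binary (octal : String) : Option String :=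
  let cs := if PySem.Str.startswith octal "0o" then octal.toList.drop 2 else octal.toList
  match pvALoop cs [] with
  | some bin => some (String.ofList ('0' :: 'b' :: bin))
  | none => none

-- ===== PORT B =====
-- B's first loop: Horner accumulation of the whole value; invalid digit → none
def pvBLoop : List Char → Nat → Option Nat
  | [], v => some v
  | c :: rest, v =>
      if '0' ≤ c ∧ c ≤ '7' then pvBLoop rest (8 * v + (c.toNat - 48))
      else none

-- chr(48 + b)
def pvChr (b : Nat) : Char := Char.ofNat (48 + b)

-- B's second loop, i = n-1 … 0: bits[i] = chr(48 + (value & 1)); value >>= 1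
-- (the cell filled first is the LAST one, so the list is built back-to-front)
def pvBits : Nat → Nat → List Char
  | 0, _ => []
  | k + 1, v => pvBits k (v / 2) ++ [pvChr (v % 2)]

def octal_to_binary_alt (octal : String) : Option String :=
  let cs := if PySem.Str.startswith octal "0o" then octal.toList.drop 2 else octal.toList
  match pvBLoop cs 0 with
  | some v => some (String.ofList ('0' :: 'b' :: pvBits (3 * cs.length) v))
  | none => none

-- ===== PRECONDITION & SPEC =====
def Spec_octal_to_binary (octal : String) (out : Option String) : Prop := out = octal_to_binary_alt octal
instance (octal : String) (out : Option String) : Decidable (Spec_octal_to_binary octal out) := by unfold Spec_octal_to_binary; infer_instance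

-- ===== CLAIM (what is proved, stated in full; the proofs are below) =====
def Claim_equal_octal_to_binary : Prop := ∀ (octal : String), Dom_octal_to_binary octal → Spec_octal_to_binary octal (octal_to_binary octal)

-- ===== LEMMAS AND PROOFS =====
theorem pvALoop_eq (cs acc : List Char) :
    pvALoop cs acc =
      if cs.all (fun c => decide ('0' ≤ c ∧ c ≤ '7')) then
        some (acc ++ cs.flatMap (fun c => pvFmt3 (c.toNat - 48)))
      else none := by
  induction cs generalizing acc with
  | nil => simp [pvALoop]
  | cons c rest ih =>
    simp only [pvALoop, List.all_cons, List.flatMap_cons]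
    by_cases h : '0' ≤ c ∧ c ≤ '7'
    · rw [if_pos h, ih]
      simp [h, List.append_assoc]
    · simp [h]

def pvHorner (cs : List Char) (v : Nat) : Nat :=
  cs.foldl (fun v c => 8 * v + (c.toNat - 48)) v

theorem pvBLoop_eq (cs : List Char) (v : Nat) :
    pvBLoop cs v =
      if cs.all (fun c => decide ('0' ≤ c ∧ c ≤ '7')) then some (pvHorner cs v)
      else none := by
  induction cs generalizing v with
  | nil => simp [pvBLoop, pvHorner]
  | cons c rest ih =>
    simp only [pvBLoop, List.all_cons]
    by_cases h : '0' ≤ c ∧ c ≤ '7'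
    · rw [if_pos h, ih]
      simp [h, pvHorner]
    · simp [h]

theorem pvBits_succ3 (k w : Nat) :
    pvBits (k + 3) w = pvBits k (w / 8) ++ [pvChr (w / 4 % 2), pvChr (w / 2 % 2), pvChr (w % 2)] := by
  show pvBits ((k + 2) + 1) w = _
  rw [pvBits]
  show pvBits ((k + 1) + 1) (w / 2) ++ _ = _
  rw [pvBits, pvBits]
  have h4 : w / 2 / 2 = w / 4 := by omega
  have h48 : w / 4 / 2 = w / 8 := by omega
  simp [h4, h48, List.append_assoc]

-- the low 3·|cs| bits of (Horner cs v) are exactly the concatenated 3-bit groups of cs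
theorem pvBits_horner (cs : List Char) (hv : cs.all (fun c => decide ('0' ≤ c ∧ c ≤ '7'))) (v : Nat) :
    pvBits (3 * cs.length) (pvHorner cs v) = cs.flatMap (fun c => pvFmt3 (c.toNat - 48)) := by
  induction cs using List.reverseRecOn generalizing v with
  | nil => simp [pvBits, pvHorner]
  | append_singleton cs c ih =>
    simp only [List.all_append, List.all_cons, List.all_nil, Bool.and_eq_true,
      decide_eq_true_eq] at hv
    obtain ⟨hcs, hc, -⟩ := hv
    have h1' : 48 ≤ c.toNat := Nat.succ_le_of_lt hc.1
    have h2' : c.toNat ≤ 55 := Fin.mk_le_mk.mp hc.2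
    have hd : c.toNat - 48 < 8 := by omega
    have hH : pvHorner (cs ++ [c]) v = 8 * pvHorner cs v + (c.toNat - 48) := by
      simp [pvHorner]
    have hlen : 3 * (cs ++ [c]).length = 3 * cs.length + 3 := by
      simp; omega
    rw [hH, hlen, pvBits_succ3]
    have e8 : (8 * pvHorner cs v + (c.toNat - 48)) / 8 = pvHorner cs v := by omega
    have e4 : (8 * pvHorner cs v + (c.toNat - 48)) / 4 % 2 = (c.toNat - 48) / 4 % 2 := by omega
    have e2 : (8 * pvHorner cs v + (c.toNat - 48)) / 2 % 2 = (c.toNat - 48) / 2 % 2 := by omega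
    have e1 : (8 * pvHorner cs v + (c.toNat - 48)) % 2 = (c.toNat - 48) % 2 := by omega
    have c4 : pvChr ((c.toNat - 48) / 4 % 2) = pvBit ((c.toNat - 48) / 4 % 2) := by
      have : (c.toNat - 48) / 4 % 2 < 2 := by omega
      interval_cases h : (c.toNat - 48) / 4 % 2 <;> decide
    have c2 : pvChr ((c.toNat - 48) / 2 % 2) = pvBit ((c.toNat - 48) / 2 % 2) := by
      have : (c.toNat - 48) / 2 % 2 < 2 := by omega
      interval_cases h : (c.toNat - 48) / 2 % 2 <;> decide
    have c1 : pvChr ((c.toNat - 48) % 2) = pvBit ((c.toNat - 48) % 2) := by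
      have : (c.toNat - 48) % 2 < 2 := by omega
      interval_cases h : (c.toNat - 48) % 2 <;> decide
    rw [e8, e4, e2, e1, c4, c2, c1, ih hcs]
    simp [pvFmt3]

-- ===== VERDICT (by name: the statement is the Claim_ definition above) =====
theorem octal_to_binary_spec : Claim_equal_octal_to_binary := by
  intro octal _
  unfold Spec_octal_to_binary octal_to_binary octal_to_binary_alt
  set cs := if PySem.Str.startswith octal "0o" = true then List.drop 2 octal.toList else octal.toList with hcs
  simp only [pvALoop_eq, pvBLoop_eq]
  by_cases h : (cs.all fun c => decide ('0' ≤ c ∧ c ≤ '7')) = true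
  · rw [if_pos h, if_pos h]
    simp [pvBits_horner _ h]
  · rw [if_neg h, if_neg h]
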